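-- pv_equiv track=rewrite | github.com/myo-05/Codingtest | 프로그래머스/2/42586. 기능개발/기능개발.py | solution
-- ===== SOURCE A (Python) =====
-- def solution(progresses, speeds):
--     answer = []
--     duty_day = []
--
--     for i,j in zip(progresses,speeds): # 작업에 소요되는 일자 계산
--         day = (100-i)//j+1 if (100-i)%j else (100-i)//j
--         duty_day.append(day)
--     while duty_day:
--         deploy = duty_day[0]
--         count = 0
--         for day in duty_day[::]:
--             if deploy >= day:
--                 count += 1
--                 a = duty_day.pop(0)
--             else:
--                 break
--         answer.append(count)
--     return answer
-- ===== SOURCE B (Python) =====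
-- def solution(progresses, speeds):
--     answer = []
--     cur = None
--     count = 0
--     for p, s in zip(progresses, speeds):
--         day = (100 - p) // s
--         if (100 - p) % s:
--             day += 1
--         if count and day <= cur:
--             count += 1
--         else:
--             if count:
--                 answer.append(count)
--             cur = day
--             count = 1
--     if count:
--         answer.append(count)
--     return answer
-- ===== Notes on version B (the rewrite author's own statement) =====
-- stated objective: faster
-- what changed: Replaces A's two-phase algorithm (build the full day list, then repeatedly pop a prefix from the front while scanning a fresh copy) by one linear pass that tracks the current batch leader's day and a counter, flushing the counter when a later feature needs more days.
import Mathlib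
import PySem

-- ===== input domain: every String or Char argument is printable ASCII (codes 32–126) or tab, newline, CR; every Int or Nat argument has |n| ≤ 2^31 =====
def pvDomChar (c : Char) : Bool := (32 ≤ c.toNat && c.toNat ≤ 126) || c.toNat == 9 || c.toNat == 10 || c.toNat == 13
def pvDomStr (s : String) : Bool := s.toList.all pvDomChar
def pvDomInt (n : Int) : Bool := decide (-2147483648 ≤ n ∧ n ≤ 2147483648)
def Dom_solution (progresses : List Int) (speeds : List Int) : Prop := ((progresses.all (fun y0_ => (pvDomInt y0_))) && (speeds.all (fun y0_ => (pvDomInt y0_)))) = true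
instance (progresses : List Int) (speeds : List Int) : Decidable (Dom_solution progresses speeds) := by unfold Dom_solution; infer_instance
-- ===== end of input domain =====

-- B replaces A's repeated pop-a-prefix scans (O(n^2)) by one linear pass tracking the
-- current batch leader's day and a counter.

-- ===== PORT A =====
-- day = (100-i)//j+1 if (100-i)%j else (100-i)//j
def pvDay (p s : Int) : Int :=
  if PySem.Int.mod (100 - p) s ≠ 0 then PySem.Int.floordiv (100 - p) s + 1
  else PySem.Int.floordiv (100 - p) s

-- inner 'for day in duty_day[::]' loop: copy is the snapshot, duty the mutated list
def innerA (deploy : Int) : List Int → List Int → Int → Int × List Int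
  | [], duty, count => (count, duty)
  | day :: rest, duty, count =>
      if deploy ≥ day then innerA deploy rest duty.tail (count + 1)  -- duty.pop(0)
      else (count, duty)

-- since duty starts equal to the snapshot and is popped in step, innerA computes a prefix count
-- (needed by whileA's termination proof, hence stated above the port)
theorem innerA_self (deploy : Int) : ∀ (copy : List Int) (count : Int),
    innerA deploy copy copy count =
      (count + ((copy.takeWhile (fun x => decide (x ≤ deploy))).length : Int),
       copy.dropWhile (fun x => decide (x ≤ deploy))) := by
  intro copy
  induction copy with
  | nil => intro count; simp [innerA]
  | cons d rest ih =>
      intro count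
      by_cases h : d ≤ deploy
      · have : innerA deploy (d :: rest) (d :: rest) count = innerA deploy rest rest (count + 1) := by
          simp [innerA, ge_iff_le, h]
        rw [this, ih]
        simp [List.takeWhile, List.dropWhile, h]
        omega
      · simp [innerA, List.takeWhile, List.dropWhile, ge_iff_le, h]

-- while duty_day: loop
def whileA : List Int → List Int → List Int
  | [], answer => answer
  | deploy :: rest, answer =>
      whileA (innerA deploy (deploy :: rest) (deploy :: rest) 0).2
             (answer ++ [(innerA deploy (deploy :: rest) (deploy :: rest) 0).1])
termination_by duty _ => duty.length
decreasing_by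
  simp [innerA_self]
  exact List.length_dropWhile_le _ _

def solution (progresses : List Int) (speeds : List Int) : List Int :=
  let duty_day := (progresses.zip speeds).foldl (fun acc x => acc ++ [pvDay x.1 x.2]) []
  whileA duty_day []

-- ===== PORT B =====
def bStep (st : List Int × Int × Int) (x : Int × Int) : List Int × Int × Int :=
  let day0 := PySem.Int.floordiv (100 - x.1) x.2
  let day := if PySem.Int.mod (100 - x.1) x.2 ≠ 0 then day0 + 1 else day0
  match st with
  | (answer, cur, count) =>
      if count ≠ 0 ∧ day ≤ cur then (answer, cur, count + 1)
      else ((if count ≠ 0 then answer ++ [count] else answer), day, 1)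

def solution_alt (progresses : List Int) (speeds : List Int) : List Int :=
  match (progresses.zip speeds).foldl bStep ([], 0, 0) with
  | (answer, _, count) => if count ≠ 0 then answer ++ [count] else answer

-- ===== PRECONDITION & SPEC =====
-- Pre_ excludes exactly the inputs where Python A (and B) raise ZeroDivisionError: a zero speed
-- among the pairs actually consumed by zip.
def Pre_solution (progresses : List Int) (speeds : List Int) : Prop :=
  ∀ x ∈ progresses.zip speeds, x.2 ≠ 0
instance (progresses : List Int) (speeds : List Int) : Decidable (Pre_solution progresses speeds) := by
  unfold Pre_solution; infer_instance
def pvWitness_solution : List Int × List Int := ([93, 30, 55], [1, 30, 5])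

def Spec_solution (progresses : List Int) (speeds : List Int) (out : List Int) : Prop :=
  out = solution_alt progresses speeds
instance (progresses : List Int) (speeds : List Int) (out : List Int) : Decidable (Spec_solution progresses speeds out) := by
  unfold Spec_solution; infer_instance

-- ===== CLAIM (what is proved, stated in full; the proofs are below) =====
def Claim_equal_solution : Prop := ∀ (progresses : List Int) (speeds : List Int), Dom_solution progresses speeds → Pre_solution progresses speeds → Spec_solution progresses speeds (solution progresses speeds)

-- ===== LEMMAS AND PROOFS =====

-- A's pure grouping function: first element leads, batch = leading maximal prefix ≤ leader
def wa : List Int → List Int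
  | [] => []
  | d :: rest =>
      (1 + ((rest.takeWhile (fun x => decide (x ≤ d))).length : Int)) ::
        wa (rest.dropWhile (fun x => decide (x ≤ d)))
termination_by l => l.length
decreasing_by
  exact Nat.lt_succ_of_le (List.length_dropWhile_le _ _)

-- B's grouping function on the running state
def groups : Int → Int → List Int → List Int
  | _, count, [] => [count]
  | cur, count, d :: ds => if d ≤ cur then groups cur (count + 1) ds else count :: groups d 1 ds

theorem whileA_eq : ∀ (n : Nat) (duty : List Int), duty.length ≤ n →
    ∀ answer, whileA duty answer = answer ++ wa duty := by
  intro n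
  induction n with
  | zero =>
      intro duty h answer
      have : duty = [] := by cases duty <;> simp_all
      subst this; rw [whileA.eq_def]; simp [wa]
  | succ n ih =>
      intro duty h answer
      cases duty with
      | nil => rw [whileA.eq_def]; simp [wa]
      | cons d rest =>
          rw [whileA.eq_def]; simp only []; rw [innerA_self]
          have hd : d ≤ d := le_refl d
          have htw : (d :: rest).takeWhile (fun x => decide (x ≤ d)) =
              d :: rest.takeWhile (fun x => decide (x ≤ d)) := by
            simp [List.takeWhile]
          have hdw : (d :: rest).dropWhile (fun x => decide (x ≤ d)) =
              rest.dropWhile (fun x => decide (x ≤ d)) := by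
            simp [List.dropWhile]
          rw [htw, hdw]
          have hlen : (rest.dropWhile (fun x => decide (x ≤ d))).length ≤ n := by
            have := List.length_dropWhile_le (fun x => decide (x ≤ d)) rest
            simp at h; omega
          rw [ih _ hlen]
          rw [wa]
          simp
          omega

theorem groups_eq_wa : ∀ (ds : List Int) (cur count : Int),
    groups cur count ds =
      (count + ((ds.takeWhile (fun x => decide (x ≤ cur))).length : Int)) ::
        wa (ds.dropWhile (fun x => decide (x ≤ cur))) := by
  intro ds
  induction ds with
  | nil => intro cur count; simp [groups, wa]
  | cons d rest ih =>
      intro cur count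
      by_cases h : d ≤ cur
      · rw [groups]
        simp only [h, if_true]
        rw [ih]
        simp [List.takeWhile, List.dropWhile, h]
        omega
      · rw [groups]
        simp only [h, if_false]
        rw [ih d 1]
        have : wa (d :: rest) =
            (1 + ((rest.takeWhile (fun x => decide (x ≤ d))).length : Int)) ::
              wa (rest.dropWhile (fun x => decide (x ≤ d))) := by rw [wa]
        simp [List.takeWhile, List.dropWhile, h, this]

-- B's fold flushed equals groups over the mapped day list, provided count > 0
theorem bFold_eq_groups : ∀ (pairs : List (Int × Int)) (answer : List Int) (cur count : Int),
    0 < count →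
    (if (pairs.foldl bStep (answer, cur, count)).2.2 ≠ 0 then
       (pairs.foldl bStep (answer, cur, count)).1 ++ [(pairs.foldl bStep (answer, cur, count)).2.2]
     else (pairs.foldl bStep (answer, cur, count)).1) =
      answer ++ groups cur count (pairs.map (fun x => pvDay x.1 x.2)) := by
  intro pairs
  induction pairs with
  | nil =>
      intro answer cur count hc
      have : count ≠ 0 := by omega
      simp [groups, this]
  | cons x rest ih =>
      intro answer cur count hc
      have hc' : count ≠ 0 := by omega
      simp only [List.foldl_cons, List.map_cons]
      by_cases h : pvDay x.1 x.2 ≤ cur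
      · have hs : bStep (answer, cur, count) x = (answer, cur, count + 1) := by
          simp [bStep, pvDay] at *
          split at h <;> simp_all
        rw [hs, ih _ _ _ (by omega)]
        rw [groups]
        simp [h]
      · have hs : bStep (answer, cur, count) x = (answer ++ [count], pvDay x.1 x.2, 1) := by
          simp only [bStep, pvDay] at *
          split at h <;> simp_all
        rw [hs, ih _ _ _ (by omega)]
        rw [groups]
        simp [h]

theorem foldl_append_map : ∀ (l : List (Int × Int)) (acc : List Int),
    l.foldl (fun acc x => acc ++ [pvDay x.1 x.2]) acc = acc ++ l.map (fun x => pvDay x.1 x.2) := by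
  intro l
  induction l with
  | nil => simp
  | cons x rest ih => intro acc; simp [ih]

-- ===== VERDICT (by name: the statement is the Claim_ definition above) =====
theorem solution_spec : Claim_equal_solution := by
  intro progresses speeds _ _
  unfold Spec_solution solution solution_alt
  rw [foldl_append_map]
  simp only [List.nil_append]
  cases hz : progresses.zip speeds with
  | nil => rw [whileA.eq_def]; simp
  | cons x rest =>
      simp only [List.map_cons, List.foldl_cons]
      have h0 : bStep ([], 0, 0) x = ([], pvDay x.1 x.2, 1) := by
        simp [bStep, pvDay]
      rw [h0, bFold_eq_groups rest [] (pvDay x.1 x.2) 1 (by omega)]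
      rw [whileA_eq (pvDay x.1 x.2 :: List.map (fun x => pvDay x.1 x.2) rest).length _ (le_refl _)]
      rw [groups_eq_wa]
      rw [wa]
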